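-- pv_equiv track=rewrite | github.com/rdwj/code-translation-skills | phase-0-discovery/py2to3-codebase-analyzer/scripts/build_dep_graph.py | is_internal_import
-- ===== SOURCE A (Python) =====
-- from typing import Dict, List, Set, Tuple, Any, Optional
--
-- def is_internal_import(module_name: str, all_modules: Set[str], codebase_packages: Set[str]) -> bool:
--     """Determine if an import refers to an internal (project) module vs external."""
--     # Direct match
--     if module_name in all_modules:
--         return True
--     # Check if it's a submodule of a known package
--     parts = module_name.split(".")
--     for i in range(len(parts), 0, -1):
--         prefix = ".".join(parts[:i])
--         if prefix in all_modules or prefix in codebase_packages: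
--             return True
--     return False
-- ===== SOURCE B (Python) =====
-- def is_internal_import(module_name, all_modules, codebase_packages):
--     """Determine if an import refers to an internal (project) module vs external."""
--     if module_name in all_modules or module_name in codebase_packages:
--         return True
--     if "." in module_name:
--         return is_internal_import(module_name.rsplit(".", 1)[0], all_modules, codebase_packages)
--     return False
-- ===== Notes on version B (the rewrite author's own statement) =====
-- stated objective: simpler
-- what changed: Replaces the index loop that rebuilds every dotted prefix with '.'.join(parts[:i]) by a direct recursion that strips one trailing component per step via rsplit('.', 1), checking both sets at each level; the redundant direct-match guard and the split/join machinery disappear.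
import Mathlib
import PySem

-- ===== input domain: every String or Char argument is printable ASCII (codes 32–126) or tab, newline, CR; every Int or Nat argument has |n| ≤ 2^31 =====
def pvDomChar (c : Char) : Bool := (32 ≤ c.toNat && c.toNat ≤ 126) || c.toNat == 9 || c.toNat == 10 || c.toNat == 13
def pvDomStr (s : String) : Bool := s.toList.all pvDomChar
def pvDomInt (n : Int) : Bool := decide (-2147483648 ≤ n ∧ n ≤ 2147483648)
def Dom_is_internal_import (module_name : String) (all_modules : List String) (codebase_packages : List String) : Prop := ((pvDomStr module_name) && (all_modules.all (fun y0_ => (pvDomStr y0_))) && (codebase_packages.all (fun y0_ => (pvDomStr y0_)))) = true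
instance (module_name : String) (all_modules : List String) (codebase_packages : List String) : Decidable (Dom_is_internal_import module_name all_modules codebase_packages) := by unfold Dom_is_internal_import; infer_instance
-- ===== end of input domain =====

-- B replaces A's index loop rebuilding every prefix with '.'.join(parts[:i]) by a recursion
-- stripping one trailing component per step (simpler decomposition, no split/join machinery).

-- ===== PORT A =====
-- the 'for i in range(len(parts), 0, -1)' loop with early return True
def pvALoop (parts all_modules codebase_packages : List String) : List Int → Bool
  | [] => false
  | i :: rest =>
    let pfx := PySem.Str.join "." (PySem.List.slice parts none (some i))
    if all_modules.contains pfx || codebase_packages.contains pfx then true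
    else pvALoop parts all_modules codebase_packages rest

def is_internal_import (module_name : String) (all_modules : List String) (codebase_packages : List String) : Bool :=
  if all_modules.contains module_name then true
  else
    let parts : List String := (PySem.Chars.splitOn module_name.toList ['.']).map String.ofList
    pvALoop parts all_modules codebase_packages (PySem.List.pyRange (parts.length : Int) 0 (-1))

-- ===== PORT B =====
-- hand port of `"." in s` + `s.rsplit(".", 1)[0]`: some (the text before the LAST '.') when s
-- contains a '.', none otherwise; exact on all inputs
def pvParent? (cs : List Char) : Option (List Char) :=
  match cs.reverse.dropWhile (fun c => c ≠ '.') with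
  | [] => none
  | _ :: rest => some rest.reverse

theorem pvParent?_length {cs p : List Char} (h : pvParent? cs = some p) : p.length < cs.length := by
  unfold pvParent? at h
  split at h
  · simp at h
  · next c rest hd =>
    injection h with h
    subst h
    have hle : (c :: rest).length ≤ cs.reverse.length := hd ▸ List.length_dropWhile_le _ _
    simp at hle ⊢
    omega

def pvAltGo (all_modules codebase_packages : List String) (cs : List Char) : Bool :=
  if all_modules.contains (String.ofList cs) || codebase_packages.contains (String.ofList cs) then
    true
  else
    match h : pvParent? cs with
    | some p => pvAltGo all_modules codebase_packages p
    | none => false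
termination_by cs.length
decreasing_by exact pvParent?_length h

def is_internal_import_alt (module_name : String) (all_modules : List String) (codebase_packages : List String) : Bool :=
  pvAltGo all_modules codebase_packages module_name.toList

-- ===== PRECONDITION & SPEC =====
def Spec_is_internal_import (module_name : String) (all_modules : List String) (codebase_packages : List String) (out : Bool) : Prop := out = is_internal_import_alt module_name all_modules codebase_packages
instance (module_name : String) (all_modules : List String) (codebase_packages : List String) (out : Bool) : Decidable (Spec_is_internal_import module_name all_modules codebase_packages out) := by unfold Spec_is_internal_import; infer_instance

-- ===== CLAIM (what is proved, stated in full; the proofs are below) =====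
def Claim_equal_is_internal_import : Prop := ∀ (module_name : String) (all_modules : List String) (codebase_packages : List String), Dom_is_internal_import module_name all_modules codebase_packages → Spec_is_internal_import module_name all_modules codebase_packages (is_internal_import module_name all_modules codebase_packages)

-- ===== LEMMAS AND PROOFS =====

-- PySem's splitOn on a one-char separator is Mathlib's List.splitOn
theorem pv_splitOn_go (c : Char) : ∀ (l : List Char) (fuel : Nat), l.length ≤ fuel →
    ∀ (cur : List Char) (acc : List (List Char)),
    PySem.Chars.splitOn.go [c] fuel l cur acc = acc.reverse ++ List.splitOnP.go (· == c) l cur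
  | [], fuel, _, cur, acc => by
    cases fuel <;> simp [PySem.Chars.splitOn.go, List.splitOnP.go]
  | a :: rest, fuel, h, cur, acc => by
    cases fuel with
    | zero => simp at h
    | succ f =>
      have hf : rest.length ≤ f := by simp at h; omega
      by_cases hc : a = c
      · subst hc
        simp [PySem.Chars.splitOn.go, List.splitOnP.go, List.isPrefixOf,
          pv_splitOn_go a rest f hf [] (cur.reverse :: acc)]
      · simp [PySem.Chars.splitOn.go, List.splitOnP.go, List.isPrefixOf, Ne.symm hc, hc,
          pv_splitOn_go c rest f hf (a :: cur) acc]

theorem pv_splitOn_eq (cs : List Char) (c : Char) :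
    PySem.Chars.splitOn cs [c] = cs.splitOn c := by
  simp [PySem.Chars.splitOn, List.splitOn, List.splitOnP,
    pv_splitOn_go c cs (cs.length + 1) (by omega) [] []]

-- every piece of splitOn '.' is '.'-free
theorem pv_splitOn_dot_free (cs : List Char) : ∀ p ∈ cs.splitOn '.', '.' ∉ p := by
  induction cs with
  | nil => simp [List.splitOn, List.splitOnP_nil]
  | cons a rest ih =>
    intro p hp
    rw [List.splitOn, List.splitOnP_cons] at hp
    by_cases hc : a = '.'
    · simp [hc] at hp
      rcases hp with h | h
      · simp [h]
      · exact ih p (by rwa [List.splitOn])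
    · simp [hc] at hp
      rcases hh : List.splitOnP (· == '.') rest with _ | ⟨q, t⟩
      · exact absurd hh (List.splitOnP_ne_nil _ _)
      · rw [hh] at hp
        simp [List.modifyHead] at hp
        rcases hp with h | h
        · subst h
          have hq : '.' ∉ q := ih q (by rw [List.splitOn, hh]; exact List.mem_cons_self)
          simp [hq]
          exact fun hh' => hc hh'.symm
        · exact ih p (by rw [List.splitOn, hh]; exact List.mem_cons_of_mem _ h)

-- join over a last component appended
theorem pv_join_append_last (qs : List (List Char)) (p : List Char) (h : qs ≠ []) :
    PySem.Chars.join ['.'] (qs ++ [p]) = PySem.Chars.join ['.'] qs ++ '.' :: p := by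
  induction qs with
  | nil => simp at h
  | cons a q' ih =>
    cases q' with
    | nil => simp [PySem.Chars.join_cons_cons, PySem.Chars.join_singleton]
    | cons b t =>
      have ih' := ih (by simp)
      simp only [List.cons_append] at ih' ⊢
      rw [PySem.Chars.join_cons_cons, PySem.Chars.join_cons_cons, ih']
      simp [List.append_assoc]

theorem pv_dropWhile_dotfree {p : List Char} (h : '.' ∉ p) :
    p.reverse.dropWhile (fun c => c ≠ '.') = [] := by
  rw [List.dropWhile_eq_nil_iff]
  intro x hx
  simp
  intro hxe
  exact h (hxe ▸ List.mem_reverse.mp hx)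

theorem pv_parent_none {p : List Char} (h : '.' ∉ p) : pvParent? p = none := by
  unfold pvParent?
  rw [pv_dropWhile_dotfree h]

theorem pv_parent_some (xs : List Char) {p : List Char} (h : '.' ∉ p) :
    pvParent? (xs ++ '.' :: p) = some xs := by
  unfold pvParent?
  rw [show (xs ++ '.' :: p).reverse = p.reverse ++ '.' :: xs.reverse by simp,
    List.dropWhile_append, pv_dropWhile_dotfree h]
  simp

-- pyRange n 0 (-1) is the descending list n, n-1, …, 1
theorem pv_pyRange_desc (n : Nat) :
    PySem.List.pyRange (n : Int) 0 (-1)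
      = (List.range n).map (fun k : Nat => (n : Int) - (k : Int)) := by
  simp [PySem.List.pyRange]
  cases n with
  | zero => simp
  | succ m =>
    have h0 : ((0:Int) < (m:Int) + 1) := by positivity
    norm_num
    intro a _
    ring

theorem pv_pyRange_succ (n : Nat) :
    PySem.List.pyRange ((n + 1 : Nat) : Int) 0 (-1)
      = ((n + 1 : Nat) : Int) :: PySem.List.pyRange (n : Int) 0 (-1) := by
  rw [pv_pyRange_desc, pv_pyRange_desc, List.range_succ_eq_map]
  simp only [List.map_cons, List.map_map, Function.comp_def]
  push_cast
  norm_num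

theorem pv_mem_pyRange_desc {n : Nat} {i : Int} (h : i ∈ PySem.List.pyRange (n : Int) 0 (-1)) :
    0 < i ∧ i.toNat ≤ n := by
  rw [pv_pyRange_desc] at h
  simp at h
  rcases h with ⟨k, hk, hi⟩
  omega

-- the loop ignores the appended last element when every index stays within qs
theorem pv_aLoop_take (all_modules codebase_packages qs : List String) (p : String) :
    ∀ idxs : List Int, (∀ i ∈ idxs, 0 ≤ i ∧ i.toNat ≤ qs.length) →
    pvALoop (qs ++ [p]) all_modules codebase_packages idxs
      = pvALoop qs all_modules codebase_packages idxs
  | [], _ => rfl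
  | i :: rest, h => by
    have hi := h i List.mem_cons_self
    have hr : ∀ j ∈ rest, 0 ≤ j ∧ j.toNat ≤ qs.length := fun j hj => h j (List.mem_cons_of_mem _ hj)
    have hsl : PySem.List.slice (qs ++ [p]) none (some i) = PySem.List.slice qs none (some i) := by
      rw [PySem.List.slice_to _ hi.1, PySem.List.slice_to _ hi.1,
        List.take_append_of_le_length hi.2]
    unfold pvALoop
    rw [hsl, pv_aLoop_take all_modules codebase_packages qs p rest hr]

-- the Python-A prefix at the full length is the whole joined name
theorem pv_join_full (ps : List (List Char)) :
    PySem.Str.join "." (ps.map String.ofList) = String.ofList (PySem.Chars.join ['.'] ps) := by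
  simp [PySem.Str.join, Function.comp_def, String.toList_ofList]

-- unfolding equations for the recursion pvAltGo
theorem pvAltGo_true {all_modules codebase_packages : List String} {cs : List Char}
    (hc : (all_modules.contains (String.ofList cs)
        || codebase_packages.contains (String.ofList cs)) = true) :
    pvAltGo all_modules codebase_packages cs = true := by
  rw [pvAltGo]
  exact if_pos hc

theorem pvAltGo_parent_some {all_modules codebase_packages : List String} {cs q : List Char}
    (hc : (all_modules.contains (String.ofList cs)
        || codebase_packages.contains (String.ofList cs)) = false)
    (hp : pvParent? cs = some q) :
    pvAltGo all_modules codebase_packages cs = pvAltGo all_modules codebase_packages q := by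
  rw [pvAltGo]
  simp only [hc, Bool.false_eq_true, if_false]
  split
  · next p' hp' => rw [hp] at hp'; injection hp' with hp'; rw [hp']
  · next hp' => rw [hp] at hp'; cases hp'

theorem pvAltGo_parent_none {all_modules codebase_packages : List String} {cs : List Char}
    (hc : (all_modules.contains (String.ofList cs)
        || codebase_packages.contains (String.ofList cs)) = false)
    (hp : pvParent? cs = none) :
    pvAltGo all_modules codebase_packages cs = false := by
  rw [pvAltGo]
  simp only [hc, Bool.false_eq_true, if_false]
  split
  · next p' hp' => rw [hp] at hp'; cases hp'
  · rfl

-- key lemma: the descending prefix loop equals the strip-last-component recursion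
theorem pv_key (all_modules codebase_packages : List String) :
    ∀ ps : List (List Char), ps ≠ [] → (∀ p ∈ ps, '.' ∉ p) →
    pvALoop (ps.map String.ofList) all_modules codebase_packages
        (PySem.List.pyRange ((ps.map String.ofList).length : Int) 0 (-1))
      = pvAltGo all_modules codebase_packages (PySem.Chars.join ['.'] ps) := by
  intro ps
  induction ps using List.reverseRecOn with
  | nil => intro h; simp at h
  | append_singleton qs p ih =>
    intro _ hfree
    have hfp : '.' ∉ p := hfree p (by simp)
    have hlen : (((qs ++ [p]).map String.ofList).length : Int) = ((qs.length + 1 : Nat) : Int) := by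
      simp
    rw [hlen, pv_pyRange_succ qs.length]
    unfold pvALoop
    have hfull : PySem.List.slice ((qs ++ [p]).map String.ofList) none
          (some ((qs.length + 1 : Nat) : Int))
        = (qs ++ [p]).map String.ofList := by
      rw [PySem.List.slice_to _ (by positivity)]
      simp
    rw [hfull, pv_join_full]
    rcases hc : (all_modules.contains (String.ofList (PySem.Chars.join ['.'] (qs ++ [p])))
        || codebase_packages.contains (String.ofList (PySem.Chars.join ['.'] (qs ++ [p]))))
        with _ | _
    · -- not found at the top level: recurse / loop on
      simp only [hc, Bool.false_eq_true, if_false]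
      have hmap : (qs ++ [p]).map String.ofList = qs.map String.ofList ++ [String.ofList p] := by
        simp
      have hstep : pvALoop ((qs ++ [p]).map String.ofList) all_modules codebase_packages
            (PySem.List.pyRange (qs.length : Int) 0 (-1))
          = pvALoop (qs.map String.ofList) all_modules codebase_packages
            (PySem.List.pyRange (qs.length : Int) 0 (-1)) := by
        rw [hmap]
        apply pv_aLoop_take
        intro i hi
        have hb := pv_mem_pyRange_desc hi
        simp only [List.length_map]
        omega
      rw [hstep]
      cases qs with
      | nil =>
        have hj : PySem.Chars.join ['.'] ([] ++ [p]) = p := by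
          simp [PySem.Chars.join_singleton]
        rw [hj] at hc ⊢
        rw [pvAltGo_parent_none hc (pv_parent_none hfp)]
        rw [show ((List.length ([] : List (List Char)) : Int)) = ((0 : Nat) : Int) by simp,
          pv_pyRange_desc 0]
        rfl
      | cons q t =>
        have hqs : (q :: t) ≠ ([] : List (List Char)) := by simp
        have hjoin : PySem.Chars.join ['.'] ((q :: t) ++ [p])
            = PySem.Chars.join ['.'] (q :: t) ++ '.' :: p := pv_join_append_last _ _ hqs
        rw [hjoin] at hc
        rw [hjoin, pvAltGo_parent_some hc (pv_parent_some _ hfp)]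
        have ih' := ih hqs (fun r hr => hfree r (List.mem_append_left _ hr))
        simp only [List.length_map] at ih'
        exact ih'
    · -- found: both sides are true
      rw [if_pos hc, pvAltGo_true hc]

-- ===== VERDICT (by name: the statement is the Claim_ definition above) =====
theorem is_internal_import_spec : Claim_equal_is_internal_import := by
  intro module_name all_modules codebase_packages _
  unfold Spec_is_internal_import is_internal_import is_internal_import_alt
  have hsplit : PySem.Chars.splitOn module_name.toList ['.']
      = module_name.toList.splitOn '.' := pv_splitOn_eq _ _
  have hne : module_name.toList.splitOn '.' ≠ [] := List.splitOnP_ne_nil _ _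
  have hfree : ∀ p ∈ module_name.toList.splitOn '.', '.' ∉ p :=
    pv_splitOn_dot_free module_name.toList
  have hjoin : PySem.Chars.join ['.'] (module_name.toList.splitOn '.') = module_name.toList := by
    simpa [PySem.Chars.join] using List.intercalate_splitOn module_name.toList '.'
  have hkey := pv_key all_modules codebase_packages (module_name.toList.splitOn '.') hne hfree
  rw [hjoin] at hkey
  rw [hsplit, hkey]
  by_cases hc : all_modules.contains module_name = true
  · rw [if_pos hc]
    have hmem : (all_modules.contains (String.ofList module_name.toList)
        || codebase_packages.contains (String.ofList module_name.toList)) = true := by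
      rw [String.ofList_toList, hc, Bool.true_or]
    rw [pvAltGo_true hmem]
  · rw [if_neg hc]
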